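-- pv_equiv track=rewrite | github.com/edwardtavila-boop/eta-engine | scripts/broker_router_pending.py | _normalize_futures_symbol
-- ===== SOURCE A (Python) =====
-- _FUTURES_ROOTS_TO_NORMALIZE = (
--     "MNQ",
--     "MES",
--     "MGC",
--     "MCL",
--     "M6E",
--     "MYM",
--     "MBT",
--     "NQ",
--     "ES",
--     "GC",
--     "CL",
--     "6E",
--     "SI",
--     "NG",
--     "ZB",
--     "ZN",
-- )
--
-- def _normalize_futures_symbol(symbol: str) -> str:
--     """Strip stray single-digit suffix from a known futures root."""
--     if not symbol:
--         return symbol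
--     for root in _FUTURES_ROOTS_TO_NORMALIZE:
--         if symbol.startswith(root):
--             rest = symbol[len(root) :]
--             if len(rest) == 1 and rest.isdigit():
--                 return root
--     return symbol
-- ===== SOURCE B (Python) =====
-- _FUTURES_ROOTS = frozenset((
--     "MNQ", "MES", "MGC", "MCL", "M6E", "MYM", "MBT",
--     "NQ", "ES", "GC", "CL", "6E", "SI", "NG", "ZB", "ZN",
-- ))
--
-- def _normalize_futures_symbol(symbol: str) -> str:
--     """Strip stray single-digit suffix from a known futures root."""
--     if symbol and symbol[-1].isdigit():
--         root = symbol[:-1]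
--         if root in _FUTURES_ROOTS:
--             return root
--     return symbol
-- ===== Notes on version B (the rewrite author's own statement) =====
-- stated objective: idiomatic
-- what changed: Inverts the search: instead of scanning all 16 roots with startswith and slicing a rest per root, B computes the single candidate root symbol[:-1], checks that the last character is a digit, and does one membership test in a precomputed frozenset of roots.
import Mathlib
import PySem

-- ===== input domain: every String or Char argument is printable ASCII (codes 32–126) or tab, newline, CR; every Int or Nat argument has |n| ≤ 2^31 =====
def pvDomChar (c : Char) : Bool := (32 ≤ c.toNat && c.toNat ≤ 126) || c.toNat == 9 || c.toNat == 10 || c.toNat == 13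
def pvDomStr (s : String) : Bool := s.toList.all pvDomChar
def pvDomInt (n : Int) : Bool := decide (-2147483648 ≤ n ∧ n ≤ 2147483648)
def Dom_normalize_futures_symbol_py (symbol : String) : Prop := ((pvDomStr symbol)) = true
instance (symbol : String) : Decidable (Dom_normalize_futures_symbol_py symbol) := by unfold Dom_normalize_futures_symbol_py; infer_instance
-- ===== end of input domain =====

-- B replaces A's linear scan over the 16 roots (startswith + slice per root) by a single
-- membership test of symbol[:-1] in a precomputed set — idiomatic inversion of the search.

-- ===== PORT A =====
def pvRootsA : List (List Char) :=
  ["MNQ".toList, "MES".toList, "MGC".toList, "MCL".toList, "M6E".toList, "MYM".toList,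
   "MBT".toList, "NQ".toList, "ES".toList, "GC".toList, "CL".toList, "6E".toList,
   "SI".toList, "NG".toList, "ZB".toList, "ZN".toList]

-- the 'for root in _FUTURES_ROOTS_TO_NORMALIZE' loop: first root whose single-digit-rest test fires
def pvLoopA (cs : List Char) : List (List Char) → Option (List Char)
  | [] => none
  | r :: rs =>
    if PySem.Chars.startswith cs r then
      let rest := cs.drop r.length
      if rest.length == 1 && PySem.Chars.strIsdigit rest then some r
      else pvLoopA cs rs
    else pvLoopA cs rs

def normalize_futures_symbol_py (symbol : String) : String :=
  if symbol.toList.isEmpty then symbol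
  else
    match pvLoopA symbol.toList pvRootsA with
    | some r => String.ofList r
    | none => symbol

-- ===== PORT B =====
def pvRootsB : PySem.Set (List Char) :=
  PySem.Set.ofList
    ["MNQ".toList, "MES".toList, "MGC".toList, "MCL".toList, "M6E".toList, "MYM".toList,
     "MBT".toList, "NQ".toList, "ES".toList, "GC".toList, "CL".toList, "6E".toList,
     "SI".toList, "NG".toList, "ZB".toList, "ZN".toList]

def normalize_futures_symbol_py_alt (symbol : String) : String :=
  match PySem.List.pyGet? symbol.toList (-1) with   -- 'symbol and symbol[-1]': none exactly when symbol is empty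
  | none => symbol
  | some c =>
    if PySem.Str.isdigit c then
      -- root = symbol[:-1]
      if pvRootsB.contains (PySem.List.slice symbol.toList none (some (-1)))
      then String.ofList (PySem.List.slice symbol.toList none (some (-1)))
      else symbol
    else symbol

-- ===== PRECONDITION & SPEC =====
def Spec_normalize_futures_symbol_py (symbol : String) (out : String) : Prop := out = normalize_futures_symbol_py_alt symbol
instance (symbol : String) (out : String) : Decidable (Spec_normalize_futures_symbol_py symbol out) := by unfold Spec_normalize_futures_symbol_py; infer_instance

-- ===== CLAIM (what is proved, stated in full; the proofs are below) =====
def Claim_equal_normalize_futures_symbol_py : Prop := ∀ (symbol : String), Dom_normalize_futures_symbol_py symbol → Spec_normalize_futures_symbol_py symbol (normalize_futures_symbol_py symbol)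

-- ===== LEMMAS AND PROOFS =====

-- A's per-root test fires exactly when cs = root ++ a single digit
lemma pvCheck_iff (cs r : List Char) :
    (PySem.Chars.startswith cs r = true ∧
      ((cs.drop r.length).length == 1 && PySem.Chars.strIsdigit (cs.drop r.length)) = true)
    ↔ ∃ d, PySem.Str.isdigit d = true ∧ cs = r ++ [d] := by
  rw [PySem.Chars.startswith_iff]
  constructor
  · rintro ⟨hp, hc⟩
    simp only [Bool.and_eq_true, beq_iff_eq] at hc
    obtain ⟨h1, hdig⟩ := hc
    obtain ⟨d, hd⟩ := List.length_eq_one_iff.mp h1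
    refine ⟨d, ?_, ?_⟩
    · simpa [PySem.Chars.strIsdigit, hd, PySem.Str.isdigit] using hdig
    · conv_lhs => rw [← List.prefix_iff_eq_append.mp hp]
      rw [hd]
  · rintro ⟨d, hd, rfl⟩
    simp [PySem.Chars.strIsdigit, PySem.Str.isdigit] at *
    exact hd

lemma pvLoop_some (cs : List Char) (rs : List (List Char)) (r : List Char)
    (hr : r ∈ rs) (d : Char) (hd : PySem.Str.isdigit d = true) (he : cs = r ++ [d]) :
    pvLoopA cs rs = some r := by
  induction rs with
  | nil => cases hr
  | cons r0 rs ih =>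
    cases hs : PySem.Chars.startswith cs r0 <;>
      cases hk : ((cs.drop r0.length).length == 1 && PySem.Chars.strIsdigit (cs.drop r0.length))
    case true.true =>
      obtain ⟨d0, hd0, he0⟩ := (pvCheck_iff cs r0).mp ⟨hs, hk⟩
      have hrr : r0 = r := (List.append_inj' (he0.symm.trans he) rfl).1
      subst hrr
      rw [pvLoopA, if_pos hs, if_pos hk]
    all_goals {
      have hmem : r ∈ rs := by
        rcases List.mem_cons.mp hr with rfl | hm
        · exfalso
          obtain ⟨h1, h2⟩ := (pvCheck_iff cs r).mpr ⟨d, hd, he⟩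
          first
            | (rw [hk] at h2; exact Bool.false_ne_true h2)
            | (rw [hs] at h1; exact Bool.false_ne_true h1)
        · exact hm
      simp only [pvLoopA, hs, hk, Bool.false_eq_true, ite_false]
      exact ih hmem
    }

lemma pvLoop_none (cs : List Char) (rs : List (List Char))
    (h : ∀ r ∈ rs, ¬ ∃ d, PySem.Str.isdigit d = true ∧ cs = r ++ [d]) :
    pvLoopA cs rs = none := by
  induction rs with
  | nil => rfl
  | cons r0 rs ih =>
    have ih' := ih fun r hr => h r (List.mem_cons_of_mem _ hr)
    cases hs : PySem.Chars.startswith cs r0 <;>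
      cases hk : ((cs.drop r0.length).length == 1 && PySem.Chars.strIsdigit (cs.drop r0.length))
    case true.true =>
      exact absurd ((pvCheck_iff cs r0).mp ⟨hs, hk⟩) (h r0 List.mem_cons_self)
    all_goals {
      simp only [pvLoopA, hs, hk, Bool.false_eq_true, ite_false]
      try exact ih'
    }

-- symbol[:-1] on a nonempty list is dropLast
lemma pvSlice_dropLast (ys : List Char) (x : Char) :
    PySem.List.slice (ys ++ [x]) none (some (-1)) = ys := by
  simp [PySem.List.slice, PySem.List.clampIdx]

-- the root-set membership agrees with membership in A's root list
lemma pvRootsB_mem (r : List Char) : pvRootsB.contains r = true ↔ r ∈ pvRootsA := by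
  rw [PySem.Set.contains_iff]
  exact PySem.Set.mem_ofList _ _

-- ===== VERDICT (by name: the statement is the Claim_ definition above) =====
theorem normalize_futures_symbol_py_spec : Claim_equal_normalize_futures_symbol_py := by
  unfold Claim_equal_normalize_futures_symbol_py
  intro symbol _
  unfold Spec_normalize_futures_symbol_py normalize_futures_symbol_py normalize_futures_symbol_py_alt
  by_cases hne : symbol.toList = []
  · simp [hne, PySem.List.pyGet?, PySem.List.pyIdx?]
  · obtain ⟨ys, x, hyx⟩ : ∃ ys x, symbol.toList = ys ++ [x] :=
      ⟨(symbol.toList).dropLast, (symbol.toList).getLast hne,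
        (List.dropLast_append_getLast hne).symm⟩
    rw [hyx]
    rw [if_neg (by simp)]
    rw [show PySem.List.pyGet? (ys ++ [x]) (-1) = some x by
      simp [PySem.List.pyGet?, PySem.List.pyIdx?]]
    rw [pvSlice_dropLast]
    cases hd : PySem.Str.isdigit x
    · -- last char not a digit: no root can fire
      rw [pvLoop_none _ _ ?_]
      · simp [hd]
      · rintro r _ ⟨d, hdig, he⟩
        have hxd : x = d := by
          have := (List.append_inj' he rfl).2
          simpa using this
        rw [← hxd] at hdig; rw [hdig] at hd; exact Bool.false_ne_true hd.symm
    · cases hm : pvRootsB.contains ys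
      · -- candidate root not known: every root fails (a firing root would equal ys)
        rw [pvLoop_none _ _ ?_]
        · simp [hd]
        · rintro r hr ⟨d, hdig, he⟩
          have hry : r = ys := (List.append_inj' he.symm rfl).1
          rw [hry] at hr
          rw [(pvRootsB_mem ys).mpr hr] at hm
          exact Bool.false_ne_true hm.symm
      · -- candidate root known: A's scan returns exactly ys
        rw [pvLoop_some _ _ ys ((pvRootsB_mem ys).mp hm) x hd rfl]
        simp [hd]
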